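-- pv_equiv track=rewrite | github.com/Akun-python/Aireviewer | app/workflows/report.py | _blocks_to_content_map
-- ===== SOURCE A (Python) =====
-- ContentKey = tuple[str, str, str | None]
--
-- def _h2_key(title: str) -> ContentKey:
--     return ("h2", (title or "").strip(), None)
--
-- def _h3_key(h2_title: str, h3_title: str) -> ContentKey:
--     return ("h3", (h2_title or "").strip(), (h3_title or "").strip())
--
-- def _append_content(content_map: dict[ContentKey, str], key: ContentKey, content: str) -> None:
--     content = (content or "").strip()
--     if not content:
--         return
--     existing = content_map.get(key)
--     if existing:
--         content_map[key] = f"{existing}\n{content}".strip()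
--     else:
--         content_map[key] = content
--
-- def _blocks_to_content_map(blocks: list[tuple[int, str, str]]) -> dict[ContentKey, str]:
--     """
--     Convert parsed [H2]/[H3] blocks into a structured map keyed by (kind, h2, h3).
--
--     - ("h2", H2, None): content directly under H2 (as intro or leaf body).
--     - ("h3", H2, H3): content under H3 (requires an active H2 context).
--     """
--     content_map: dict[ContentKey, str] = {}
--     current_h2: str | None = None
--     for level, title, content in blocks:
--         if level == 2:
--             current_h2 = title.strip()
--             _append_content(content_map, _h2_key(current_h2), content)
--             continue
--         if level == 3:
--             if not current_h2:
--                 # Orphan H3 without a preceding H2. Keep it for debugging, but it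
--                 # won't match expected outline and will be refilled later.
--                 current_h2 = ""
--             _append_content(content_map, _h3_key(current_h2, title), content)
--             continue
--     return content_map
-- ===== SOURCE B (Python) =====
-- def _blocks_to_content_map(blocks):
--     """Stage 1: flatten blocks into an ordered list of (key, fragment) pairs
--     (non-empty stripped fragments only); stage 2: distinct keys in
--     first-occurrence order; stage 3: one scan-and-join per key."""
--     keyed = []
--     h2 = ""
--     for level, title, content in blocks:
--         if level == 2:
--             h2 = title.strip()
--             key = ("h2", h2, None)
--         elif level == 3:
--             key = ("h3", h2, title.strip())
--         else:
--             continue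
--         fragment = content.strip()
--         if fragment:
--             keyed.append((key, fragment))
--     order = list(dict.fromkeys(key for key, _ in keyed))
--     return {key: "\n".join(f for k, f in keyed if k == key) for key in order}
-- ===== Notes on version B (the rewrite author's own statement) =====
-- stated objective: alternative
-- what changed: B replaces A's single pass that maintains the result dict via the _append_content strip-and-concatenate helper by a staged group-by: first flatten the blocks into an ordered list of (key, non-empty stripped fragment) pairs, then take the distinct keys in first-occurrence order, then build each value with one scan-and-join over the fragment list per key.
import Mathlib
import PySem

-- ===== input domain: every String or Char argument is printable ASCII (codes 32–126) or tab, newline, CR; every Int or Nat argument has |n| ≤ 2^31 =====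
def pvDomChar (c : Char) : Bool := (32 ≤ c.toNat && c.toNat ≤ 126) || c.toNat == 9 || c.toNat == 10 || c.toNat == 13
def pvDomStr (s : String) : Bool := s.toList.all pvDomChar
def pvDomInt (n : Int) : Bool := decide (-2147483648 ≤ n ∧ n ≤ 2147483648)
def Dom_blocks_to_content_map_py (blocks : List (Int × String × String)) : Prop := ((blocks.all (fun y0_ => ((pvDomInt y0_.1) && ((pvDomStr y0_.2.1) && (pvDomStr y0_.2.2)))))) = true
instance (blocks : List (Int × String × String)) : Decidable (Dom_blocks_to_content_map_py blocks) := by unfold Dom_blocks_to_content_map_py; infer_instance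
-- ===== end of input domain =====

-- B replaces A's incremental dict-building pass (strip-and-concatenate per block) by a staged
-- group-by: flatten to keyed fragments, distinct keys in first-occurrence order, one join per key.

-- ===== PORT A =====
-- dict key ("h2"|"h3", h2, h3?); the returned dict is the association list of (flattened key, value) quads.
abbrev CKey : Type := String × String × Option String

def h2_key_py (title : String) : CKey := ("h2", PySem.Str.strip title, none)

def h3_key_py (h2_title : String) (h3_title : String) : CKey :=
  ("h3", PySem.Str.strip h2_title, some (PySem.Str.strip h3_title))

-- _append_content; the f-string f"{existing}\n{content}" is ported as "\n".join([existing, content]) (exact)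
def append_content_py (content_map : PySem.Dict CKey String) (key : CKey) (content : String) :
    PySem.Dict CKey String :=
  if PySem.Str.strip content = "" then content_map
  else
    match content_map.get? key with
    | some existing =>
        if existing = "" then content_map.insert key (PySem.Str.strip content)
        else content_map.insert key
               (PySem.Str.strip (PySem.Str.join "\n" [existing, PySem.Str.strip content]))
    | none => content_map.insert key (PySem.Str.strip content)

-- `if not current_h2: current_h2 = ""` (None and "" are falsy)
def py_truthy_or_empty (cur : Option String) : String :=
  match cur with
  | none => ""
  | some s => if s = "" then "" else s

def blocks_A_step (st : PySem.Dict CKey String × Option String) (b : Int × String × String) :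
    PySem.Dict CKey String × Option String :=
  if b.1 = 2 then
    (append_content_py st.1 (h2_key_py (PySem.Str.strip b.2.1)) b.2.2, some (PySem.Str.strip b.2.1))
  else if b.1 = 3 then
    (append_content_py st.1 (h3_key_py (py_truthy_or_empty st.2) b.2.1) b.2.2,
     some (py_truthy_or_empty st.2))
  else st

def blocks_to_content_map_py (blocks : List (Int × String × String)) :
    List (String × String × Option String × String) :=
  ((blocks.foldl blocks_A_step (PySem.Dict.empty, none)).1.items).map
    (fun p => (p.1.1, p.1.2.1, p.1.2.2, p.2))

-- ===== PORT B =====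
-- stage 1 loop body of Source B: `fragment = content.strip(); if fragment: keyed.append((key, fragment))`
def push_frag (keyed : List (CKey × String)) (key : CKey) (content : String) :
    List (CKey × String) :=
  if PySem.Str.strip content = "" then keyed else keyed ++ [(key, PySem.Str.strip content)]

def kf_step (st : List (CKey × String) × String) (b : Int × String × String) :
    List (CKey × String) × String :=
  if b.1 = 2 then
    (push_frag st.1 ("h2", PySem.Str.strip b.2.1, none) b.2.2, PySem.Str.strip b.2.1)
  else if b.1 = 3 then
    (push_frag st.1 ("h3", st.2, some (PySem.Str.strip b.2.1)) b.2.2, st.2)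
  else st

-- stages 2 + 3: list(dict.fromkeys(...)) = PySem.List.dedup; per-key filter-and-join
def blocks_to_content_map_py_alt (blocks : List (Int × String × String)) :
    List (String × String × Option String × String) :=
  let keyed := (blocks.foldl kf_step ([], "")).1
  (PySem.List.dedup (keyed.map Prod.fst)).map
    (fun k => (k.1, k.2.1, k.2.2,
       PySem.Str.join "\n" ((keyed.filter (fun p => p.1 == k)).map Prod.snd)))

-- ===== PRECONDITION & SPEC =====
def Spec_blocks_to_content_map_py (blocks : List (Int × String × String)) (out : List (String × String × Option String × String)) : Prop := out = blocks_to_content_map_py_alt blocks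
instance (blocks : List (Int × String × String)) (out : List (String × String × Option String × String)) : Decidable (Spec_blocks_to_content_map_py blocks out) := by unfold Spec_blocks_to_content_map_py; infer_instance

-- ===== CLAIM (what is proved, stated in full; the proofs are below) =====
def Claim_equal_blocks_to_content_map_py : Prop := ∀ (blocks : List (Int × String × String)), Dom_blocks_to_content_map_py blocks → Spec_blocks_to_content_map_py blocks (blocks_to_content_map_py blocks)

-- ===== LEMMAS AND PROOFS =====

-- strings whose strip is themselves and are non-empty (every stored fragment)
def pvGoodCh (cs : List Char) : Prop := cs ≠ [] ∧ PySem.Chars.strip cs = cs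
def pvGood (s : String) : Prop := pvGoodCh s.toList
def pvJoin (l : List String) : String := PySem.Str.join "\n" l
def pvF (p : CKey × List String) : CKey × String := (p.1, pvJoin p.2)

-- proof-only intermediate: the grouping dict built per block (bridges A's dict to B's stages)
def blocks_B_add (groups : PySem.Dict CKey (List String)) (key : CKey) (content : String) :
    PySem.Dict CKey (List String) :=
  if PySem.Str.strip content = "" then groups
  else groups.modify key [] (fun l => l ++ [PySem.Str.strip content])

def blocks_B_step (st : PySem.Dict CKey (List String) × String) (b : Int × String × String) :
    PySem.Dict CKey (List String) × String :=
  if b.1 = 2 then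
    (blocks_B_add st.1 ("h2", PySem.Str.strip b.2.1, none) b.2.2, PySem.Str.strip b.2.1)
  else if b.1 = 3 then
    (blocks_B_add st.1 ("h3", st.2, some (PySem.Str.strip b.2.1)) b.2.2, st.2)
  else st

def pvGrpStep (d : PySem.Dict CKey (List String)) (p : CKey × String) :
    PySem.Dict CKey (List String) :=
  d.modify p.1 [] (fun t => t ++ [p.2])

def pvInvD (dA : PySem.Dict CKey String) (g : PySem.Dict CKey (List String)) : Prop :=
  dA.items = g.items.map pvF ∧ ∀ p ∈ g.items, p.2 ≠ [] ∧ ∀ s ∈ p.2, pvGood s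

def pvInv (stA : PySem.Dict CKey String × Option String)
    (stB : PySem.Dict CKey (List String) × String) : Prop :=
  pvInvD stA.1 stB.1 ∧ stA.2.getD "" = stB.2 ∧ PySem.Str.strip stB.2 = stB.2

lemma pv_head_false {p : Char → Bool} {c : Char} {t : List Char}
    (h : List.dropWhile p (c :: t) = c :: t) : p c = false := by
  by_cases hpc : p c = true
  · rw [List.dropWhile_cons, if_pos hpc] at h
    have h1 := List.length_dropWhile_le p t
    have h2 := congrArg List.length h
    simp at h2
    omega
  · simpa using hpc

lemma pv_dropWhile_idem (p : Char → Bool) (l : List Char) :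
    (l.dropWhile p).dropWhile p = l.dropWhile p := by
  induction l with
  | nil => simp
  | cons a l ih =>
      by_cases h : p a
      · simp [h, ih]
      · simp [h]

lemma pv_prefix_fix {p : Char → Bool} {u v : List Char}
    (hv : List.dropWhile p v = v) (hp : u <+: v) : List.dropWhile p u = u := by
  cases u with
  | nil => simp
  | cons c t =>
      obtain ⟨r, rfl⟩ := hp
      have hc : p c = false := pv_head_false (t := t ++ r) (by simpa using hv)
      simp [hc]

lemma pv_strip_of_ends {cs : List Char}
    (h1 : List.dropWhile PySem.Chars.isspace cs = cs)
    (h2 : List.dropWhile PySem.Chars.isspace cs.reverse = cs.reverse) :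
    PySem.Chars.strip cs = cs := by
  simp [PySem.Chars.strip, PySem.Chars.lstrip, PySem.Chars.rstrip, h1, h2]

lemma pv_ends_of_strip {cs : List Char} (h : PySem.Chars.strip cs = cs) :
    List.dropWhile PySem.Chars.isspace cs = cs ∧
    List.dropWhile PySem.Chars.isspace cs.reverse = cs.reverse := by
  have hls : List.dropWhile PySem.Chars.isspace cs = cs := by
    have hsuf := List.dropWhile_suffix (l := cs) PySem.Chars.isspace
    apply hsuf.eq_of_length
    have hle : (PySem.Chars.strip cs).length ≤ (List.dropWhile PySem.Chars.isspace cs).length := by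
      simp only [PySem.Chars.strip, PySem.Chars.rstrip, PySem.Chars.lstrip, List.length_reverse]
      have := List.length_dropWhile_le PySem.Chars.isspace
          (List.dropWhile PySem.Chars.isspace cs).reverse
      simpa using this
    rw [h] at hle
    have := List.length_dropWhile_le PySem.Chars.isspace cs
    omega
  refine ⟨hls, ?_⟩
  have h' := h
  simp only [PySem.Chars.strip, PySem.Chars.lstrip, PySem.Chars.rstrip] at h'
  rw [hls] at h'
  have := congrArg List.reverse h'
  simpa using this

lemma pv_strip_idem (cs : List Char) :
    PySem.Chars.strip (PySem.Chars.strip cs) = PySem.Chars.strip cs := by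
  apply pv_strip_of_ends
  · have hfix : List.dropWhile PySem.Chars.isspace (PySem.Chars.lstrip cs)
        = PySem.Chars.lstrip cs := by
      simp [PySem.Chars.lstrip, pv_dropWhile_idem]
    have hsuf := List.dropWhile_suffix (l := (PySem.Chars.lstrip cs).reverse) PySem.Chars.isspace
    have hpre : PySem.Chars.strip cs <+: PySem.Chars.lstrip cs := by
      simp only [PySem.Chars.strip, PySem.Chars.rstrip]
      have h3 := List.reverse_prefix.mpr hsuf
      simpa using h3
    exact pv_prefix_fix hfix hpre
  · simp only [PySem.Chars.strip, PySem.Chars.rstrip, List.reverse_reverse]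
    exact pv_dropWhile_idem _ _

lemma pv_strip_append {a b : List Char} (ha : a ≠ []) (hb : b ≠ [])
    (sa : PySem.Chars.strip a = a) (sb : PySem.Chars.strip b = b) :
    PySem.Chars.strip (a ++ '\n' :: b) = a ++ '\n' :: b := by
  obtain ⟨h1a, _⟩ := pv_ends_of_strip sa
  obtain ⟨_, h2b⟩ := pv_ends_of_strip sb
  apply pv_strip_of_ends
  · cases a with
    | nil => exact absurd rfl ha
    | cons c t =>
        have hc : PySem.Chars.isspace c = false := pv_head_false h1a
        simp [hc]
  · cases hbr : b.reverse with
    | nil =>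
        exact absurd (by simpa using congrArg List.reverse hbr) hb
    | cons c t =>
        have hc : PySem.Chars.isspace c = false := pv_head_false (by rw [← hbr]; exact h2b)
        rw [List.reverse_append, List.reverse_cons, hbr]
        simp [hc]

lemma pv_join_singleton (a : List Char) : PySem.Chars.join ['\n'] [a] = a := by
  simp [PySem.Chars.join, List.intercalate]

lemma pv_join_cons (a : List Char) (l : List (List Char)) (hl : l ≠ []) :
    PySem.Chars.join ['\n'] (a :: l) = a ++ '\n' :: PySem.Chars.join ['\n'] l := by
  cases l with
  | nil => exact absurd rfl hl
  | cons b t => simp [PySem.Chars.join, List.intercalate]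

lemma pv_join_snoc (l : List (List Char)) (x : List Char) (hl : l ≠ []) :
    PySem.Chars.join ['\n'] (l ++ [x]) = PySem.Chars.join ['\n'] l ++ '\n' :: x := by
  induction l with
  | nil => exact absurd rfl hl
  | cons a l ih =>
      cases l with
      | nil => simp [pv_join_cons]
      | cons b t =>
          rw [List.cons_append, pv_join_cons a _ (by simp),
              pv_join_cons a (b :: t) (by simp), ih (by simp)]
          simp

lemma pv_join_good (l : List (List Char)) (hl : l ≠ [])
    (h : ∀ cs ∈ l, cs ≠ [] ∧ PySem.Chars.strip cs = cs) :
    PySem.Chars.join ['\n'] l ≠ [] ∧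
    PySem.Chars.strip (PySem.Chars.join ['\n'] l) = PySem.Chars.join ['\n'] l := by
  induction l with
  | nil => exact absurd rfl hl
  | cons a l ih =>
      cases l with
      | nil => rw [pv_join_singleton]; exact h a (by simp)
      | cons b t =>
          obtain ⟨hj1, hj2⟩ := ih (by simp) (fun cs hcs => h cs (by simp [hcs]))
          obtain ⟨ha1, ha2⟩ := h a (by simp)
          rw [pv_join_cons a (b :: t) (by simp)]
          refine ⟨by simp [ha1], pv_strip_append ha1 hj1 ha2 hj2⟩

lemma pv_str_ext {s t : String} (h : s.toList = t.toList) : s = t := String.toList_inj.mp h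

lemma pv_empty_toList : ("" : String).toList = [] := by decide

lemma pv_nl_toList : ("\n" : String).toList = ['\n'] := by decide

lemma pv_ne_empty_iff {s : String} : s ≠ "" ↔ s.toList ≠ [] := by
  constructor
  · intro h hc
    exact h (pv_str_ext (hc.trans pv_empty_toList.symm))
  · intro h hc
    exact h (by rw [hc, pv_empty_toList])

lemma pv_str_strip_idem (s : String) :
    PySem.Str.strip (PySem.Str.strip s) = PySem.Str.strip s := by
  apply pv_str_ext
  simp only [PySem.Str.toList_strip]
  exact pv_strip_idem _

lemma pv_good_strip {content : String} (h : PySem.Str.strip content ≠ "") :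
    pvGood (PySem.Str.strip content) := by
  refine ⟨pv_ne_empty_iff.mp h, ?_⟩
  simp only [PySem.Str.toList_strip]
  exact pv_strip_idem _

lemma pv_join_toList (l : List String) :
    (pvJoin l).toList = PySem.Chars.join ['\n'] (l.map String.toList) := by
  simp [pvJoin, PySem.Str.toList_join, pv_nl_toList]

lemma pv_join_single (s : String) : pvJoin [s] = s := by
  apply pv_str_ext
  rw [pv_join_toList]
  simp

lemma pvGood_join {l : List String} (hl : l ≠ []) (h : ∀ s ∈ l, pvGood s) : pvGood (pvJoin l) := by
  have hmain := pv_join_good (l.map String.toList)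
    (by simpa using hl)
    (by intro cs hcs
        obtain ⟨s, hs, rfl⟩ := List.mem_map.mp hcs
        exact h s hs)
  unfold pvGood pvGoodCh
  rw [pv_join_toList]
  exact hmain

lemma pv_strip_join2 {l : List String} {c : String} (hl : l ≠ [])
    (hgl : ∀ s ∈ l, pvGood s) (hc : pvGood c) :
    PySem.Str.strip (PySem.Str.join "\n" [pvJoin l, c]) = pvJoin (l ++ [c]) := by
  apply pv_str_ext
  obtain ⟨hj1, hj2⟩ := pvGood_join hl hgl
  have h2 : (PySem.Str.join "\n" [pvJoin l, c]).toList
      = (pvJoin l).toList ++ '\n' :: c.toList := by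
    simp [PySem.Str.toList_join, pv_nl_toList, PySem.Chars.join, List.intercalate]
  rw [PySem.Str.toList_strip, h2, pv_strip_append hj1 hc.1 hj2 hc.2]
  rw [pv_join_toList, pv_join_toList]
  simp only [List.map_append, List.map_cons, List.map_nil]
  rw [pv_join_snoc _ _ (by simpa using hl)]

lemma pv_get?_map (l : List (CKey × List String)) (k : CKey) :
    (PySem.Dict.mk (l.map pvF) : PySem.Dict CKey String).get? k
      = ((PySem.Dict.mk l : PySem.Dict CKey (List String)).get? k).map pvJoin := by
  induction l with
  | nil => simp [PySem.Dict.get?]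
  | cons p l ih =>
      rw [List.map_cons, show pvF p = (p.1, pvJoin p.2) from rfl,
          PySem.Dict.get?_mk_cons, PySem.Dict.get?_mk_cons]
      by_cases h : (p.1 == k) = true
      · simp [h]
      · simp [h, ih]

lemma pv_get?_of_items {dA : PySem.Dict CKey String} {g : PySem.Dict CKey (List String)}
    (h : dA.items = g.items.map pvF) (k : CKey) :
    dA.get? k = (g.get? k).map pvJoin := by
  obtain ⟨la⟩ := dA
  obtain ⟨lb⟩ := g
  have h' : la = lb.map pvF := h
  subst h'
  exact pv_get?_map lb k

lemma pv_append_step (dA : PySem.Dict CKey String) (g : PySem.Dict CKey (List String))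
    (key : CKey) (content : String) (hinv : pvInvD dA g) :
    pvInvD (append_content_py dA key content) (blocks_B_add g key content) := by
  obtain ⟨hitems, hfr⟩ := hinv
  unfold append_content_py blocks_B_add
  by_cases hc : PySem.Str.strip content = ""
  · simp only [hc]
    simp only [if_true]
    exact ⟨hitems, hfr⟩
  · simp only [if_neg hc]
    have hgood : pvGood (PySem.Str.strip content) := pv_good_strip hc
    cases hget : g.get? key with
    | none =>
        have hgetA : dA.get? key = none := by
          rw [pv_get?_of_items hitems, hget]; rfl
        have hcont : g.contains key = false := by
          rw [PySem.Dict.contains_eq_isSome_get?, hget]; rfl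
        have hcontA : dA.contains key = false := by
          rw [PySem.Dict.contains_eq_isSome_get?, hgetA]; rfl
        simp only [hgetA]
        have hmod : g.modify key [] (fun l => l ++ [PySem.Str.strip content])
            = g.insert key [PySem.Str.strip content] := by
          unfold PySem.Dict.modify
          rw [PySem.Dict.getD_of_not_contains _ _ hcont]
          rfl
        rw [hmod]
        constructor
        · rw [PySem.Dict.items_insert_of_not_contains _ _ hcontA,
              PySem.Dict.items_insert_of_not_contains _ _ hcont,
              List.map_append, hitems]
          simp [pvF, pv_join_single]
        · intro p hp
          rw [PySem.Dict.items_insert_of_not_contains _ _ hcont] at hp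
          rcases List.mem_append.mp hp with hp | hp
          · exact hfr p hp
          · have hpe : p = (key, [PySem.Str.strip content]) := by simpa using hp
            subst hpe
            refine ⟨by simp, ?_⟩
            intro s hs
            have : s = PySem.Str.strip content := by simpa using hs
            subst this
            exact hgood
    | some l =>
        have hgetA : dA.get? key = some (pvJoin l) := by
          rw [pv_get?_of_items hitems, hget]; rfl
        have hcont : g.contains key = true := by
          rw [PySem.Dict.contains_eq_isSome_get?, hget]; rfl
        have hcontA : dA.contains key = true := by
          rw [PySem.Dict.contains_eq_isSome_get?, hgetA]; rfl
        have hmem : (key, l) ∈ g.items := PySem.Dict.mem_items_of_get?_eq_some g hget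
        obtain ⟨hlne, hlg⟩ := hfr (key, l) hmem
        have hjne : pvJoin l ≠ "" := pv_ne_empty_iff.mpr (pvGood_join hlne hlg).1
        simp only [hgetA, if_neg hjne]
        have hval : PySem.Str.strip (PySem.Str.join "\n" [pvJoin l, PySem.Str.strip content])
            = pvJoin (l ++ [PySem.Str.strip content]) := pv_strip_join2 hlne hlg hgood
        have hmod : g.modify key [] (fun t => t ++ [PySem.Str.strip content])
            = g.insert key (l ++ [PySem.Str.strip content]) := by
          unfold PySem.Dict.modify
          rw [PySem.Dict.getD_of_get?_eq_some _ _ hget]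
        rw [hmod, hval]
        constructor
        · rw [PySem.Dict.items_insert_of_contains _ _ hcontA,
              PySem.Dict.items_insert_of_contains _ _ hcont,
              hitems, List.map_map, List.map_map]
          apply List.map_congr_left
          intro p _
          by_cases hk : (p.1 == key) = true
          · simp [pvF, Function.comp, hk]
          · simp [pvF, Function.comp, hk]
        · intro p hp
          rw [PySem.Dict.items_insert_of_contains _ _ hcont] at hp
          obtain ⟨q, hq, hqe⟩ := List.mem_map.mp hp
          by_cases hk : (q.1 == key) = true
          · rw [if_pos hk] at hqe
            subst hqe
            refine ⟨by simp, ?_⟩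
            intro s hs
            rcases List.mem_append.mp hs with hs | hs
            · exact hlg s hs
            · have : s = PySem.Str.strip content := by simpa using hs
              subst this
              exact hgood
          · rw [if_neg hk] at hqe
            subst hqe
            exact hfr q hq

lemma pv_cur_eq (o : Option String) : py_truthy_or_empty o = o.getD "" := by
  cases o with
  | none => rfl
  | some s =>
      by_cases hs : s = ""
      · simp [py_truthy_or_empty, hs]
      · simp [py_truthy_or_empty, hs]

set_option maxHeartbeats 1000000 in
lemma pv_step (stA : PySem.Dict CKey String × Option String)
    (stB : PySem.Dict CKey (List String) × String) (b : Int × String × String)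
    (h : pvInv stA stB) : pvInv (blocks_A_step stA b) (blocks_B_step stB b) := by
  obtain ⟨hd, hcur, hstrip⟩ := h
  by_cases h2 : b.1 = 2
  · simp only [blocks_A_step, blocks_B_step, if_pos h2]
    refine ⟨?_, rfl, pv_str_strip_idem _⟩
    have hk : h2_key_py (PySem.Str.strip b.2.1) = (("h2", PySem.Str.strip b.2.1, none) : CKey) := by
      unfold h2_key_py
      rw [pv_str_strip_idem]
    rw [hk]
    exact pv_append_step _ _ _ _ hd
  · by_cases h3 : b.1 = 3
    · simp only [blocks_A_step, blocks_B_step, if_neg h2, if_pos h3]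
      have hce : py_truthy_or_empty stA.2 = stB.2 := (pv_cur_eq stA.2).trans hcur
      rw [hce]
      refine ⟨?_, rfl, hstrip⟩
      have hk : h3_key_py stB.2 b.2.1 = (("h3", stB.2, some (PySem.Str.strip b.2.1)) : CKey) := by
        unfold h3_key_py
        rw [hstrip]
      rw [hk]
      exact pv_append_step _ _ _ _ hd
    · simp only [blocks_A_step, blocks_B_step, if_neg h2, if_neg h3]
      exact ⟨hd, hcur, hstrip⟩

lemma pv_fold (blocks : List (Int × String × String)) :
    ∀ stA stB, pvInv stA stB →
      pvInv (blocks.foldl blocks_A_step stA) (blocks.foldl blocks_B_step stB) := by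
  induction blocks with
  | nil => intro _ _ h; exact h
  | cons b bs ih =>
      intro stA stB h
      exact ih _ _ (pv_step _ _ b h)

-- stage-1 flattening versus the per-block grouping dict
lemma pv_add_eq_grp (g : PySem.Dict CKey (List String)) (key : CKey) (content : String) :
    blocks_B_add g key content = (push_frag [] key content).foldl pvGrpStep g := by
  unfold blocks_B_add push_frag
  by_cases hc : PySem.Str.strip content = ""
  · simp [hc]
  · simp [hc, pvGrpStep]

lemma pv_B_via_kf (blocks : List (Int × String × String)) :
    ∀ (g : PySem.Dict CKey (List String)) (keyed : List (CKey × String)) (h2 : String),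
      blocks.foldl blocks_B_step (g, h2)
        = (((blocks.foldl kf_step (keyed, h2)).1.drop keyed.length).foldl pvGrpStep g,
           (blocks.foldl kf_step (keyed, h2)).2) := by
  induction blocks with
  | nil => intro g keyed h2; simp
  | cons b bs ih =>
      intro g keyed h2
      by_cases h2b : b.1 = 2
      · simp only [List.foldl_cons, blocks_B_step, kf_step, if_pos h2b]
        rw [ih, pv_add_eq_grp]
        have hdrop : ∀ bs' : List (Int × String × String), ∀ acc extra h,
            ((bs'.foldl kf_step (acc ++ extra, h)).1.drop acc.length)
              = extra ++ ((bs'.foldl kf_step (acc ++ extra, h)).1.drop (acc ++ extra).length) := by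
          intro bs' acc extra h
          have hpre : ∀ bs'' : List (Int × String × String), ∀ st : List (CKey × String) × String,
              st.1 <+: (bs''.foldl kf_step st).1 := by
            intro bs''
            induction bs'' with
            | nil => intro st; exact List.prefix_refl _
            | cons c cs ihc =>
                intro st
                refine List.IsPrefix.trans ?_ (ihc (kf_step st c))
                unfold kf_step push_frag
                split_ifs <;> simp
          obtain ⟨r, hr⟩ := hpre bs' (acc ++ extra, h)
          rw [← hr]
          simp
        have hx := hdrop bs keyed (push_frag [] ("h2", PySem.Str.strip b.2.1, none) b.2.2)
            (PySem.Str.strip b.2.1)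
        have hpf : push_frag keyed ("h2", PySem.Str.strip b.2.1, none) b.2.2
            = keyed ++ push_frag [] ("h2", PySem.Str.strip b.2.1, none) b.2.2 := by
          unfold push_frag; split_ifs <;> simp
        rw [hpf, hx, List.foldl_append]
      · by_cases h3b : b.1 = 3
        · simp only [List.foldl_cons, blocks_B_step, kf_step, if_neg h2b, if_pos h3b]
          rw [ih, pv_add_eq_grp]
          have hdrop : ∀ bs' : List (Int × String × String), ∀ acc extra h,
              ((bs'.foldl kf_step (acc ++ extra, h)).1.drop acc.length)
                = extra ++ ((bs'.foldl kf_step (acc ++ extra, h)).1.drop (acc ++ extra).length) := by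
            intro bs' acc extra h
            have hpre : ∀ bs'' : List (Int × String × String), ∀ st : List (CKey × String) × String,
                st.1 <+: (bs''.foldl kf_step st).1 := by
              intro bs''
              induction bs'' with
              | nil => intro st; exact List.prefix_refl _
              | cons c cs ihc =>
                  intro st
                  refine List.IsPrefix.trans ?_ (ihc (kf_step st c))
                  unfold kf_step push_frag
                  split_ifs <;> simp
            obtain ⟨r, hr⟩ := hpre bs' (acc ++ extra, h)
            rw [← hr]
            simp
          have hx := hdrop bs keyed (push_frag [] ("h3", h2, some (PySem.Str.strip b.2.1)) b.2.2) h2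
          have hpf : push_frag keyed ("h3", h2, some (PySem.Str.strip b.2.1)) b.2.2
              = keyed ++ push_frag [] ("h3", h2, some (PySem.Str.strip b.2.1)) b.2.2 := by
            unfold push_frag; split_ifs <;> simp
          rw [hpf, hx, List.foldl_append]
        · simp only [List.foldl_cons, blocks_B_step, kf_step, if_neg h2b, if_neg h3b]
          exact ih g keyed h2

-- items of the grouping fold, characterised by dedup + filter
lemma pv_grp_items (l : List (CKey × String)) :
    (l.foldl pvGrpStep (PySem.Dict.empty : PySem.Dict CKey (List String))).items
      = (PySem.List.dedup (l.map Prod.fst)).map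
          (fun k => (k, (l.filter (fun p => p.1 == k)).map Prod.snd)) := by
  have hfold : l.foldl pvGrpStep (PySem.Dict.empty : PySem.Dict CKey (List String))
      = l.foldl (fun d p => d.modify p.1 [] (fun t => t ++ [p.2])) PySem.Dict.empty := rfl
  rw [hfold]
  have hnd : (l.foldl (fun d p => d.modify p.1 [] (fun t => t ++ [p.2]))
      (PySem.Dict.empty : PySem.Dict CKey (List String))).keys.Nodup := by
    exact PySem.Dict.nodup_keys_foldl_modify_key l Prod.fst []
      (fun d p => fun t => t ++ [p.2]) PySem.Dict.empty PySem.Dict.nodup_keys_empty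
  have hkeys : (l.foldl (fun d p => d.modify p.1 [] (fun t => t ++ [p.2]))
      (PySem.Dict.empty : PySem.Dict CKey (List String))).keys
        = PySem.List.dedup (l.map Prod.fst) := by
    rw [PySem.Dict.keys_foldl_modify_key]
    simp [PySem.Dict.keys_empty, PySem.Set.update, PySem.Set.ofList_eq_foldl,
      PySem.List.dedup_eq_ofList]
  rw [PySem.Dict.items_eq_map_keys _ hnd [], hkeys]
  apply List.map_congr_left
  intro k _
  rw [PySem.Dict.getD_foldl_modify_append]
  simp [PySem.Dict.getD_empty]

-- ===== VERDICT (by name: the statement is the Claim_ definition above) =====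
theorem blocks_to_content_map_py_spec : Claim_equal_blocks_to_content_map_py := by
  intro blocks _
  show blocks_to_content_map_py blocks = blocks_to_content_map_py_alt blocks
  have hinv0 : pvInv (PySem.Dict.empty, none) (PySem.Dict.empty, "") := by
    refine ⟨⟨rfl, ?_⟩, rfl, by decide⟩
    intro p hp
    simp [PySem.Dict.empty] at hp
  have h := pv_fold blocks (PySem.Dict.empty, none) (PySem.Dict.empty, "") hinv0
  have hB := pv_B_via_kf blocks PySem.Dict.empty [] ""
  unfold blocks_to_content_map_py blocks_to_content_map_py_alt
  rw [h.1.1, hB]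
  simp only [List.length_nil, List.drop_zero]
  rw [pv_grp_items, List.map_map, List.map_map]
  rfl
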